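-- pv_equiv track=rewrite | github.com/ZJU-Automated-Reasoning-Group/arlib | arlib/symabs/affine_relation/Elder/matrix_ops.py | _find_odd_power_two
-- ===== SOURCE A (Python) =====
-- from typing import Tuple, List, Optional
--
-- def _find_odd_power_two(value: int, w: int) -> Tuple[int, int]:
--     """Find odd u and p such that u * 2^p = value mod 2^w, with 1 <= u < 2^w and u odd."""
--     if value == 0:
--         return 0, 0
--
--     p = 0
--     val = value % (2**w)  # Work modulo 2^w
--
--     # Count trailing zeros (the power of 2)
--     while val % 2 == 0 and val > 0:
--         val >>= 1
--         p += 1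
--
--     # If val is 0 after removing factors of 2, then value was pure power of 2
--     if val == 0:
--         return 1, p  # Represent as 1 * 2^p
--
--     # val is now odd, ensure it's in range [1, 2^w - 1]
--     if val >= 2**w:
--         val >>= 1  # Make it smaller, but this changes the representation
--         p += 1
--
--     return val, p
-- ===== SOURCE B (Python) =====
-- from typing import Tuple
--
--
-- def _find_odd_power_two(value: int, w: int) -> Tuple[int, int]:
--     """Find odd u and p such that u * 2^p = value mod 2^w, with 1 <= u < 2^w and u odd."""
--     if value == 0:
--         return 0, 0
--     val = value % (2 ** w)
--     if val == 0:
--         return 1, 0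
--     # closed form: lowest set bit gives the power of two directly
--     p = (val & -val).bit_length() - 1
--     return val >> p, p
-- ===== Notes on version B (the rewrite author's own statement) =====
-- stated objective: faster
-- what changed: The trailing-zero while-loop and the dead range-reduction branch are replaced by the closed-form lowest-set-bit computation p = (val & -val).bit_length() - 1 followed by a single shift.
import Mathlib
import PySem

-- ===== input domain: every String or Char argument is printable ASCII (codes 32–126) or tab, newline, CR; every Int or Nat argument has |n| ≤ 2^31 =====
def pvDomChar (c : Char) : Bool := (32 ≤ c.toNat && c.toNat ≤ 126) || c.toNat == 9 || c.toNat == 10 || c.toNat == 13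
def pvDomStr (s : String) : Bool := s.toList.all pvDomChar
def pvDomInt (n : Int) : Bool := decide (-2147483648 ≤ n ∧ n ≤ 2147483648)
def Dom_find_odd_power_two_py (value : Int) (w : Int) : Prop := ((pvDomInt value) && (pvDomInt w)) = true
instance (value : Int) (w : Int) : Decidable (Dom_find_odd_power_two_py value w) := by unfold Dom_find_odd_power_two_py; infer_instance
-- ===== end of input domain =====

-- B replaces A's trailing-zero while-loop by the closed-form lowest-set-bit computation
-- (val & -val).bit_length() - 1 (measured faster in a timing run; return value proved equal on Pre_).

-- ===== PORT A =====
-- the while-loop of A: strip factors of two, counting them in p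
def stripTwosA (val p : Int) : Int × Int :=
  if h : PySem.Int.mod val 2 = 0 ∧ 0 < val then stripTwosA (val >>> (1:Nat)) (p + 1) else (val, p)
termination_by val.toNat
decreasing_by
  have h1 : val >>> (1:Nat) = val / 2 := by
    simpa using Int.shiftRight_eq_div_pow val 1
  omega

-- On Pre_ the expression `value % (2**w)` of the Python is `value % 2^(w.toNat)`:
-- for 0 ≤ w this is literal; for -1075 < w < 0 Python's float modulus yields 0.0,
-- and `2 ^ w.toNat = 1` makes the port's val 0 as well (exact on Pre_).
def find_odd_power_two_py (value : Int) (w : Int) : Int × Int :=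
  if value = 0 then (0, 0)
  else
    let val := PySem.Int.mod value (2 ^ w.toNat)
    let r := stripTwosA val 0
    if r.1 = 0 then (1, r.2)
    else if r.1 ≥ 2 ^ w.toNat then (r.1 >>> (1:Nat), r.2 + 1)
    else r

-- ===== PORT B =====
def find_odd_power_two_py_alt (value : Int) (w : Int) : Int × Int :=
  if value = 0 then (0, 0)
  else
    let val := PySem.Int.mod value (2 ^ w.toNat)
    if val = 0 then (1, 0)
    else
      let p : Int := (PySem.Int.bitLength (PySem.Int.band val (-val)) : Int) - 1
      (val >>> p.toNat, p)

-- ===== PRECONDITION & SPEC =====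
-- Pre_ excludes exactly value ≠ 0 with w ≤ -1075: there Python's 2**w underflows to the
-- float 0.0 and `value % 0.0` raises ZeroDivisionError (in A and in B alike).
def Pre_find_odd_power_two_py (value : Int) (w : Int) : Prop := value = 0 ∨ -1075 < w
instance (value : Int) (w : Int) : Decidable (Pre_find_odd_power_two_py value w) := by
  unfold Pre_find_odd_power_two_py; infer_instance

def pvWitness_find_odd_power_two_py : Int × Int := (12, 4)

def Spec_find_odd_power_two_py (value : Int) (w : Int) (out : Int × Int) : Prop := out = find_odd_power_two_py_alt value w
instance (value : Int) (w : Int) (out : Int × Int) : Decidable (Spec_find_odd_power_two_py value w out) := by unfold Spec_find_odd_power_two_py; infer_instance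

-- ===== CLAIM (what is proved, stated in full; the proofs are below) =====
def Claim_equal_find_odd_power_two_py : Prop := ∀ (value : Int) (w : Int), Dom_find_odd_power_two_py value w → Pre_find_odd_power_two_py value w → Spec_find_odd_power_two_py value w (find_odd_power_two_py value w)

-- ===== LEMMAS AND PROOFS =====

-- trailing zeros of a natural number (proof-side characterisation of A's loop)
def tzN (n : Nat) : Nat :=
  if h : n % 2 = 0 ∧ 0 < n then tzN (n / 2) + 1 else 0
termination_by n
decreasing_by omega

lemma tzN_odd {n : Nat} (h : n % 2 = 1) : tzN n = 0 := by
  rw [tzN, dif_neg (by omega)]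

lemma tzN_even {n : Nat} (h : n % 2 = 0) (h0 : 0 < n) : tzN n = tzN (n / 2) + 1 := by
  conv_lhs => rw [tzN]
  rw [dif_pos (And.intro h h0)]

lemma two_pow_tzN_le {n : Nat} (h0 : 0 < n) : 2 ^ tzN n ≤ n := by
  induction n using Nat.strong_induction_on with
  | _ n ih =>
    rcases Nat.even_or_odd n with he | ho
    · have h2 : n % 2 = 0 := Nat.even_iff.mp he
      rw [tzN_even h2 h0, pow_succ]
      have := ih (n / 2) (by omega) (by omega)
      omega
    · rw [tzN_odd (Nat.odd_iff.mp ho)]; omega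

lemma land_pred_eq {n : Nat} (h0 : 0 < n) : n &&& (n - 1) = n - 2 ^ tzN n := by
  induction n using Nat.strong_induction_on with
  | _ n ih =>
    rcases Nat.even_or_odd n with he | ho
    · -- n even: n = 2m, n-1 = 2(m-1)+1
      have h2 : n % 2 = 0 := Nat.even_iff.mp he
      have ihm := ih (n / 2) (by omega) (by omega)
      have hle := two_pow_tzN_le (n := n / 2) (by omega)
      have hbits : n &&& (n - 1) = 2 * ((n / 2) &&& (n / 2 - 1)) := by
        apply Nat.eq_of_testBit_eq
        intro i
        cases i with
        | zero =>
          simp [Nat.testBit_zero]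
          omega
        | succ i =>
          have hd : (n - 1) / 2 = n / 2 - 1 := by omega
          have hd2 : 2 * ((n / 2) &&& (n / 2 - 1)) / 2 = (n / 2) &&& (n / 2 - 1) := by omega
          rw [Nat.testBit_land]
          simp only [Nat.testBit_add_one, hd, hd2]
          rw [Nat.testBit_land]
      rw [hbits, ihm, tzN_even h2 h0, pow_succ]
      omega
    · -- n odd: n &&& (n-1) = n - 1
      have h2 : n % 2 = 1 := Nat.odd_iff.mp ho
      have hbits : n &&& (n - 1) = n - 1 := by
        apply Nat.eq_of_testBit_eq
        intro i
        cases i with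
        | zero =>
          simp [Nat.testBit_zero]
          omega
        | succ i =>
          have hd : (n - 1) / 2 = n / 2 := by omega
          rw [Nat.testBit_land]
          simp only [Nat.testBit_add_one, hd]
          simp
      rw [hbits, tzN_odd h2]
      omega

lemma band_neg_self {n : Nat} (h0 : 0 < n) :
    PySem.Int.band (n : Int) (-(n : Int)) = ((2 ^ tzN n : Nat) : Int) := by
  have hle := two_pow_tzN_le h0
  have hland := land_pred_eq h0
  have hpos : (0 : Int) < (n : Int) := by exact_mod_cast h0
  unfold PySem.Int.band
  rw [if_pos (by omega : (0:Int) ≤ (n:Int)), if_neg (by omega : ¬ (0:Int) ≤ -(n:Int))]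
  have h1 : (-(-(n : Int)) - 1).toNat = n - 1 := by omega
  rw [h1, Int.toNat_natCast, hland]
  rw [Nat.sub_sub_self hle]

lemma bitLength_two_pow (t : Nat) :
    PySem.Int.bitLength ((2 ^ t : Nat) : Int) = t + 1 := by
  induction t with
  | zero => decide
  | succ t ih =>
    rw [PySem.Int.bitLength_natCast (by positivity)]
    have : 2 ^ (t + 1) / 2 = 2 ^ t := by
      rw [pow_succ]; omega
    rw [this, ih]

lemma shiftRight_natCast (n k : Nat) : (n : Int) >>> k = ((n >>> k : Nat) : Int) := by
  rw [Int.shiftRight_eq_div_pow, Nat.shiftRight_eq_div_pow]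
  rw [Int.natCast_div]

lemma stripTwosA_eq (n : Nat) (h0 : 0 < n) :
    ∀ p, stripTwosA (n : Int) p = (((n / 2 ^ tzN n : Nat) : Int), p + tzN n) := by
  induction n using Nat.strong_induction_on with
  | _ n ih =>
    intro p
    rcases Nat.even_or_odd n with he | ho
    · have h2 : n % 2 = 0 := Nat.even_iff.mp he
      have hmod : PySem.Int.mod (n : Int) 2 = 0 := by
        rw [show ((2:Int)) = ((2 : Nat) : Int) by norm_num, PySem.Int.mod_natCast]
        exact_mod_cast h2
      have hpos : (0 : Int) < n := by exact_mod_cast h0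
      rw [stripTwosA, dif_pos ⟨hmod, hpos⟩]
      have hs : (n : Int) >>> (1:Nat) = ((n / 2 : Nat) : Int) := by
        simp [shiftRight_natCast, Nat.shiftRight_eq_div_pow]
      rw [hs, ih (n / 2) (by omega) (by omega) (p + 1)]
      rw [tzN_even h2 h0]
      have hdd : n / 2 / 2 ^ tzN (n / 2) = n / 2 ^ (tzN (n / 2) + 1) := by
        rw [Nat.div_div_eq_div_mul, pow_succ, Nat.mul_comm]
      rw [hdd]
      simp only [Prod.mk.injEq, true_and]
      push_cast
      ring
    · have h2 : n % 2 = 1 := Nat.odd_iff.mp ho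
      have hmod : PySem.Int.mod (n : Int) 2 ≠ 0 := by
        rw [show ((2:Int)) = ((2 : Nat) : Int) by norm_num, PySem.Int.mod_natCast]
        simp [h2]
      rw [stripTwosA, dif_neg (by tauto)]
      rw [tzN_odd h2]
      simp

lemma stripTwosA_zero (p : Int) : stripTwosA 0 p = (0, p) := by
  rw [stripTwosA]; simp

-- ===== VERDICT (by name: the statement is the Claim_ definition above) =====
theorem find_odd_power_two_py_spec : Claim_equal_find_odd_power_two_py := by
  intro value w _hdom hpre
  unfold Spec_find_odd_power_two_py find_odd_power_two_py find_odd_power_two_py_alt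
  by_cases hv0 : value = 0
  · simp [hv0]
  · simp only [if_neg hv0]
    set M : Int := 2 ^ w.toNat with hM
    have hMpos : (0 : Int) < M := by positivity
    set val : Int := PySem.Int.mod value M with hval
    have hv_nonneg : 0 ≤ val := PySem.Int.mod_nonneg _ hMpos
    have hv_lt : val < M := PySem.Int.mod_lt _ hMpos
    by_cases hvz : val = 0
    · rw [hvz]
      simp [stripTwosA_zero]
    · -- val > 0
      have hvpos : 0 < val := lt_of_le_of_ne hv_nonneg (Ne.symm hvz)
      obtain ⟨n, hn⟩ : ∃ n : Nat, val = (n : Int) := ⟨val.toNat, by omega⟩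
      have hn0 : 0 < n := by omega
      set t := tzN n with ht
      have hstrip := stripTwosA_eq n hn0 0
      rw [← hn, ← ht] at hstrip
      rw [hstrip]
      have hqpos : 0 < n / 2 ^ t := Nat.div_pos (two_pow_tzN_le hn0) (by positivity)
      have hq_ne : ((n / 2 ^ t : Nat) : Int) ≠ 0 := Nat.cast_ne_zero.mpr hqpos.ne'
      have hle1 : (n / 2 ^ t : Nat) ≤ n := Nat.div_le_self _ _
      have hle2 : ((n / 2 ^ t : Nat) : Int) ≤ (n : Int) := by exact_mod_cast hle1
      have hq_lt : ((n / 2 ^ t : Nat) : Int) < M := lt_of_le_of_lt hle2 (hn ▸ hv_lt)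
      rw [if_neg hq_ne, if_neg (by omega)]
      -- B side
      rw [if_neg hvz, hn, band_neg_self hn0, bitLength_two_pow]
      have hpt : ((t + 1 : Nat) : Int) - 1 = (t : Int) := by push_cast; ring
      rw [hpt]
      have htn : ((t : Int)).toNat = t := by omega
      rw [htn, shiftRight_natCast, Nat.shiftRight_eq_div_pow]
      simp [ht]
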